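-- pv_equiv track=rewrite | github.com/eyeCube/Softly-Roguelike | misc.py | itemize
-- ===== SOURCE A (Python) =====
-- def itemize(items):
--     ch=0
--     start=97                    #<- start with a-z
--     for item in items:
--         if ch >= 26:
--             ch=0
--             if start == 97:
--                 start=65        #<- start with A-Z
--             else:
--                 start=48        #<- start with 0-9
--         elif (ch > 9 and start == 48):
--             break               #<- finished early, too many items
--         yield (chr(ch+start),item)
--         ch += 1
-- ===== SOURCE B (Python) =====
-- import string
--
-- def itemize(items):
--     yield from zip(string.ascii_lowercase + string.ascii_uppercase + string.digits, items)
-- ===== Notes on version B (the rewrite author's own statement) =====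
-- stated objective: idiomatic
-- what changed: Replaced the stateful three-phase counter loop (ch/start registers with reset and break) by precomputing the 62-symbol label alphabet once and zipping it with the items, relying on zip's truncation for the 62-item cap.
import Mathlib
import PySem

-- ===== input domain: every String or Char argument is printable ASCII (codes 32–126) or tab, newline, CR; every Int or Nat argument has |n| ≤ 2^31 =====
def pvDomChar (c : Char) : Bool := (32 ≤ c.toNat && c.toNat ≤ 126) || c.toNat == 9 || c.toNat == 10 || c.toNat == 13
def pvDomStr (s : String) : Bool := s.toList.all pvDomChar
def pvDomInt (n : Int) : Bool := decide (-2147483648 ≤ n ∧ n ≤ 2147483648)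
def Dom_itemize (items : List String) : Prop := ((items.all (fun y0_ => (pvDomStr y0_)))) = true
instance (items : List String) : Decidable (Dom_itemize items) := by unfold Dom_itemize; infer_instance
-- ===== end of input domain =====

-- B replaces A's stateful ch/start counter loop by zipping a precomputed 62-label alphabet with the items (idiomatic; same cost).
-- Both A and B are generators in Python; the ports return the list of yielded pairs.

-- ===== PORT A =====
-- The loop's state (ch, start) and break are transcribed as structural recursion over items.
def itemizeAux (items : List String) (ch start : Int) : List (String × String) :=
  match items with
  | [] => []
  | item :: rest =>
    if ch ≥ 26 then
      -- ch=0; start := 65 or 48; then yield chr(0+start) and ch+=1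
      let start' : Int := if start = 97 then 65 else 48
      (String.mk [Char.ofNat ((0 + start').toNat)], item) :: itemizeAux rest 1 start'
    else if ch > 9 ∧ start = 48 then
      []  -- break
    else
      (String.mk [Char.ofNat ((ch + start).toNat)], item) :: itemizeAux rest (ch + 1) start

def itemize (items : List String) : List (String × String) :=
  itemizeAux items 0 97

-- ===== PORT B =====
def pvLabels : List Char :=
  "abcdefghijklmnopqrstuvwxyzABCDEFGHIJKLMNOPQRSTUVWXYZ0123456789".toList

def itemize_alt (items : List String) : List (String × String) :=
  (pvLabels.map (fun c => String.mk [c])).zip items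

-- ===== PRECONDITION & SPEC =====
def Spec_itemize (items : List String) (out : List (String × String)) : Prop := out = itemize_alt items
instance (items : List String) (out : List (String × String)) : Decidable (Spec_itemize items out) := by unfold Spec_itemize; infer_instance

-- ===== CLAIM (what is proved, stated in full; the proofs are below) =====
def Claim_equal_itemize : Prop := ∀ (items : List String), Dom_itemize items → Spec_itemize items (itemize items)

-- ===== LEMMAS AND PROOFS =====

-- the (ch,start) state A's loop is in before its (pos+1)-st iteration, for the reachable positions pos = 0..62
def pvChOf (pos : Nat) : Int := if pos ≤ 26 then pos else if pos ≤ 52 then (pos : Int) - 26 else (pos : Int) - 52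
def pvStOf (pos : Nat) : Int := if pos ≤ 26 then 97 else if pos ≤ 52 then 65 else 48

-- the label at position pos, as a function of pos
def pvLabelAt (pos : Nat) : Char :=
  Char.ofNat (if pos < 26 then pos + 97 else if pos < 52 then pos - 26 + 65 else pos - 52 + 48)

theorem pvLabels_drop_eq : ∀ p : Fin 62, pvLabels.drop (p : Nat) = pvLabelAt p :: pvLabels.drop ((p : Nat) + 1) := by decide

theorem itemizeAux_eq (items : List String) :
    ∀ pos : Nat, pos ≤ 62 →
      itemizeAux items (pvChOf pos) (pvStOf pos) =
        ((pvLabels.drop pos).map (fun c => String.mk [c])).zip items := by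
  induction items with
  | nil => intro pos _; simp [itemizeAux]
  | cons item rest ih =>
    intro pos hpos
    by_cases h62 : pos = 62
    · subst h62
      have : pvLabels.drop 62 = [] := by decide
      simp [itemizeAux, pvChOf, pvStOf, this]
    · have hlt : pos < 62 := lt_of_le_of_ne hpos h62
      rw [pvLabels_drop_eq ⟨pos, hlt⟩]
      by_cases h26 : pos = 26
      · subst h26
        have h1 : pvLabelAt 26 = 'A' := by decide
        have h2 := ih 27 (by norm_num)
        simp only [itemizeAux, pvChOf, pvStOf] at h2 ⊢
        norm_num at h2 ⊢
        exact ⟨by decide, h2⟩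
      · by_cases h52 : pos = 52
        · subst h52
          have h1 : pvLabelAt 52 = '0' := by decide
          have h2 := ih 53 (by norm_num)
          simp only [itemizeAux, pvChOf, pvStOf] at h2 ⊢
          norm_num at h2 ⊢
          exact ⟨by decide, h2⟩
        · -- generic position: no reset, no break
          have hch : ¬ (pvChOf pos ≥ 26) := by
            unfold pvChOf; split_ifs <;> omega
          have hbr : ¬ (pvChOf pos > 9 ∧ pvStOf pos = 48) := by
            unfold pvChOf pvStOf; split_ifs <;> omega
          have hstep_ch : pvChOf (pos + 1) = pvChOf pos + 1 := by
            unfold pvChOf; split_ifs <;> omega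
          have hstep_st : pvStOf (pos + 1) = pvStOf pos := by
            unfold pvStOf pvChOf at *; split_ifs at * <;> omega
          have hchar : Char.ofNat ((pvChOf pos + pvStOf pos).toNat) = pvLabelAt pos := by
            unfold pvChOf pvStOf pvLabelAt
            congr 1
            split_ifs <;> omega
          have h2 := ih (pos + 1) (by omega)
          rw [hstep_ch, hstep_st] at h2
          simp only [itemizeAux, if_neg hch, if_neg hbr, hchar, h2, List.map_cons, List.zip_cons_cons]
-- ===== VERDICT (by name: the statement is the Claim_ definition above) =====
theorem itemize_spec : Claim_equal_itemize := by
  intro items _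
  unfold Spec_itemize itemize itemize_alt
  have h := itemizeAux_eq items 0 (by norm_num)
  simpa [pvChOf, pvStOf] using h
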